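-- pv_equiv track=rewrite | github.com/alasdairnicol/advent-of-code-2022 | day23.py | do_turn
-- ===== SOURCE A (Python) =====
-- from collections import defaultdict
--
-- def propose_north(grid, x, y):
--     if not {(x - 1, y - 1), (x, y - 1), (x + 1, y - 1)} & grid:
--         return (x, y - 1)
--
-- def propose_south(grid, x, y):
--     if not {(x - 1, y + 1), (x, y + 1), (x + 1, y + 1)} & grid:
--         return (x, y + 1)
--
-- def propose_west(grid, x, y):
--     if not {(x - 1, y - 1), (x - 1, y), (x - 1, y + 1)} & grid:
--         return (x - 1, y)
--
-- def propose_east(grid, x, y):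
--     if not {(x + 1, y - 1), (x + 1, y), (x + 1, y + 1)} & grid:
--         return (x + 1, y)
--
-- def do_turn(grid, turn_number):
--     proposed_moves = defaultdict(list)
--
--     functions = [propose_north, propose_south, propose_west, propose_east]
--     functions = functions[turn_number % 4 :] + functions[: turn_number % 4]
--
--     for (x, y) in grid:
--         neighbours = {
--             (x + 1, y),
--             (x + 1, y + 1),
--             (x, y + 1),
--             (x - 1, y + 1),
--             (x - 1, y),
--             (x - 1, y - 1),
--             (x, y - 1),
--             (x + 1, y - 1),
--         }
--         if not neighbours & grid:
--             continue
--
--         for function in functions: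
--             if proposed := function(grid, x, y):
--                 proposed_moves[proposed].append((x, y))
--                 break
--
--     num_changes = 0
--     for k, values in proposed_moves.items():
--         if len(values) == 1:
--             grid.remove(values[0])
--             grid.add(k)
--             num_changes += 1
--
--     return num_changes
-- ===== SOURCE B (Python) =====
-- _ALL_DIRS = [(0, -1), (0, 1), (-1, 0), (1, 0)]  # north, south, west, east
--
--
-- def do_turn(grid, turn_number):
--     t = turn_number % 4
--     order = _ALL_DIRS[t:] + _ALL_DIRS[:t]
--     g0 = frozenset(grid)  # snapshot: all checks see the pre-turn grid
--
--     def propose(x, y):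
--         if all((x + dx, y + dy) not in g0
--                for dx in (-1, 0, 1) for dy in (-1, 0, 1) if (dx, dy) != (0, 0)):
--             return None
--         for dx, dy in order:
--             if dx == 0:
--                 blocked = any((x + i, y + dy) in g0 for i in (-1, 0, 1))
--             else:
--                 blocked = any((x + dx, y + j) in g0 for j in (-1, 0, 1))
--             if not blocked:
--                 return (x + dx, y + dy)
--         return None
--
--     # No Counter/dict of proposals: two elves can only collide head-on (a
--     # proposer's own blocked-check rules out every perpendicular competitor),
--     # so an elf moves iff its mirror elf does not propose the same square.
--     num_changes = 0
--     for (x, y) in list(grid):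
--         tgt = propose(x, y)
--         if tgt is None:
--             continue
--         mirror = (2 * tgt[0] - x, 2 * tgt[1] - y)
--         if mirror in g0 and propose(*mirror) == tgt:
--             continue
--         grid.remove((x, y))
--         grid.add(tgt)
--         num_changes += 1
--     return num_changes
-- ===== Notes on version B (the rewrite author's own statement) =====
-- stated objective: alternative
-- what changed: B drops A's defaultdict-of-proposals entirely: it computes each elf's proposal with a local propose() and decides the move per elf by checking only the single geometrically possible competitor - the mirror elf on the opposite side of the target (two elves can only collide head-on, since a proposer's own blocked-check rules out every perpendicular competitor) - instead of grouping proposals by target and counting list lengths.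
import Mathlib
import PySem

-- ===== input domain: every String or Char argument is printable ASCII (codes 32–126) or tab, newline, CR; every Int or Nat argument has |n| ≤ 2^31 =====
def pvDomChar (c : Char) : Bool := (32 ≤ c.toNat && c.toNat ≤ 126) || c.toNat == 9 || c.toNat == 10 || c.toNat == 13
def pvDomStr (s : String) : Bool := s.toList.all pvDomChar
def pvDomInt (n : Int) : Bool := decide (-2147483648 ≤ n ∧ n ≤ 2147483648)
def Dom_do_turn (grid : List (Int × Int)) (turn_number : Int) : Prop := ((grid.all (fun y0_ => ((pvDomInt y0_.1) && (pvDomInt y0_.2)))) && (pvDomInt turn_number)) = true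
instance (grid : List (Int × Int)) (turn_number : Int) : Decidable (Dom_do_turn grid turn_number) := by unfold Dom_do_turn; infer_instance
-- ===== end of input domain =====

-- B drops A's defaultdict of proposal lists: each elf's move is decided locally by checking only the mirror elf
-- (the single geometrically possible competitor for its target); both Pythons mutate the caller's grid set
-- identically - the equivalence proved here is about the RETURN value (the number of moved elves), so the ports
-- model the count and omit the in-place remove/add.


-- ===== PORT A =====
def propose_north (grid : List (Int × Int)) (x y : Int) : Option (Int × Int) :=
  if PySem.Set.inter (PySem.Set.ofList [(x - 1, y - 1), (x, y - 1), (x + 1, y - 1)]) grid = [] then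
    some (x, y - 1) else none

def propose_south (grid : List (Int × Int)) (x y : Int) : Option (Int × Int) :=
  if PySem.Set.inter (PySem.Set.ofList [(x - 1, y + 1), (x, y + 1), (x + 1, y + 1)]) grid = [] then
    some (x, y + 1) else none

def propose_west (grid : List (Int × Int)) (x y : Int) : Option (Int × Int) :=
  if PySem.Set.inter (PySem.Set.ofList [(x - 1, y - 1), (x - 1, y), (x - 1, y + 1)]) grid = [] then
    some (x - 1, y) else none

def propose_east (grid : List (Int × Int)) (x y : Int) : Option (Int × Int) :=
  if PySem.Set.inter (PySem.Set.ofList [(x + 1, y - 1), (x + 1, y), (x + 1, y + 1)]) grid = [] then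
    some (x + 1, y) else none

def do_turn (grid : List (Int × Int)) (turn_number : Int) : Int :=
  let t := PySem.Int.mod turn_number 4
  let functions := [propose_north, propose_south, propose_west, propose_east]
  let functions := PySem.List.slice functions (some t) none ++ PySem.List.slice functions none (some t)
  let proposed_moves : PySem.Dict (Int × Int) (List (Int × Int)) :=
    grid.foldl (fun d p =>
      let x := p.1; let y := p.2
      if PySem.Set.inter (PySem.Set.ofList
          [(x + 1, y), (x + 1, y + 1), (x, y + 1), (x - 1, y + 1),
           (x - 1, y), (x - 1, y - 1), (x, y - 1), (x + 1, y - 1)]) grid = [] then d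
      else
        match functions.findSome? (fun f => f grid x y) with
        | some proposed => d.modify proposed [] (· ++ [(x, y)])   -- defaultdict(list) append
        | none => d) PySem.Dict.empty
  -- the Python loop body also moves the elf in the caller's set (grid.remove / grid.add); that side
  -- effect does not feed back into num_changes, so the port computes the returned count (see header).
  proposed_moves.items.foldl (fun num_changes kv =>
    if kv.2.length == 1 then num_changes + 1 else num_changes) (0 : Int)

-- ===== PORT B =====
def pvAllDirs : List (Int × Int) := [(0, -1), (0, 1), (-1, 0), (1, 0)]

-- Source B's isolation generator: the 8 deltas (dx,dy) ∈ {-1,0,1}² \ {(0,0)} in its iteration order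
def pvNbrDeltas : List (Int × Int) :=
  [(-1, -1), (-1, 0), (-1, 1), (0, -1), (0, 1), (1, -1), (1, 0), (1, 1)]

def pvIsolated (g : List (Int × Int)) (x y : Int) : Bool :=
  pvNbrDeltas.all fun d => !(PySem.Set.contains g (x + d.1, y + d.2))

def pvBlocked (g : List (Int × Int)) (d : Int × Int) (x y : Int) : Bool :=
  if d.1 == 0 then
    PySem.Set.contains g (x - 1, y + d.2) || PySem.Set.contains g (x, y + d.2) ||
      PySem.Set.contains g (x + 1, y + d.2)
  else
    PySem.Set.contains g (x + d.1, y - 1) || PySem.Set.contains g (x + d.1, y) ||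
      PySem.Set.contains g (x + d.1, y + 1)

-- the 'for dx, dy in order: … return' loop inside Source B's propose
def pvFirstDir (g : List (Int × Int)) (order : List (Int × Int)) (x y : Int) : Option (Int × Int) :=
  match order with
  | [] => none
  | d :: rest =>
    if pvBlocked g d x y then pvFirstDir g rest x y else some (x + d.1, y + d.2)

def pvPropose (g : List (Int × Int)) (order : List (Int × Int)) (x y : Int) : Option (Int × Int) :=
  if pvIsolated g x y then none else pvFirstDir g order x y

def do_turn_alt (grid : List (Int × Int)) (turn_number : Int) : Int :=
  let t := PySem.Int.mod turn_number 4
  let order := PySem.List.slice pvAllDirs (some t) none ++ PySem.List.slice pvAllDirs none (some t)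
  -- Source B's main loop: propose, then skip iff the mirror elf proposes the same square; Source B also
  -- performs grid.remove/grid.add on the caller's set against the frozen snapshot g0 - a side effect
  -- that does not feed back into num_changes, so the port computes the returned count (see header).
  grid.foldl (fun num_changes p =>
    match pvPropose grid order p.1 p.2 with
    | none => num_changes
    | some tgt =>
      if PySem.Set.contains grid (2 * tgt.1 - p.1, 2 * tgt.2 - p.2) &&
          (pvPropose grid order (2 * tgt.1 - p.1) (2 * tgt.2 - p.2) == some tgt) then
        num_changes
      else num_changes + 1) (0 : Int)

-- ===== PRECONDITION & SPEC =====
-- Python's grid is a set; under the type convention it is a list of DISTINCT elements, so a list with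
-- duplicate pairs represents no Python input and is excluded.
def Pre_do_turn (grid : List (Int × Int)) (turn_number : Int) : Prop := grid.Nodup
instance (grid : List (Int × Int)) (turn_number : Int) : Decidable (Pre_do_turn grid turn_number) := by unfold Pre_do_turn; infer_instance

def pvWitness_do_turn : (List (Int × Int)) × Int := ([(0, 0), (1, 0), (4, 4)], 1)

def Spec_do_turn (grid : List (Int × Int)) (turn_number : Int) (out : Int) : Prop := out = do_turn_alt grid turn_number
instance (grid : List (Int × Int)) (turn_number : Int) (out : Int) : Decidable (Spec_do_turn grid turn_number out) := by unfold Spec_do_turn; infer_instance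

-- ===== CLAIM (what is proved, stated in full; the proofs are below) =====
def Claim_equal_do_turn : Prop := ∀ (grid : List (Int × Int)) (turn_number : Int), Dom_do_turn grid turn_number → Pre_do_turn grid turn_number → Spec_do_turn grid turn_number (do_turn grid turn_number)

-- ===== LEMMAS AND PROOFS =====

-- proof-side abbreviations (used only by the lemmas below)
def PvFn : Type := List (Int × Int) → Int → Int → Option (Int × Int)

def pvNbrCells (p : Int × Int) : List (Int × Int) :=
  [(p.1 + 1, p.2), (p.1 + 1, p.2 + 1), (p.1, p.2 + 1), (p.1 - 1, p.2 + 1),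
   (p.1 - 1, p.2), (p.1 - 1, p.2 - 1), (p.1, p.2 - 1), (p.1 + 1, p.2 - 1)]

def pvAFold (g : List (Int × Int)) (fns : List PvFn) : PySem.Dict (Int × Int) (List (Int × Int)) :=
  g.foldl (fun d p =>
    if PySem.Set.inter (PySem.Set.ofList (pvNbrCells p)) g = [] then d
    else
      match fns.findSome? (fun f => f g p.1 p.2) with
      | some proposed => d.modify proposed [] (· ++ [p])
      | none => d) PySem.Dict.empty

def pvASide (g : List (Int × Int)) (fns : List PvFn) : Int :=
  (pvAFold g fns).items.foldl (fun num_changes kv =>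
    if kv.2.length == 1 then num_changes + 1 else num_changes) (0 : Int)

def pvMirror (p t : Int × Int) : Int × Int := (2 * t.1 - p.1, 2 * t.2 - p.2)

def pvBGood (g : List (Int × Int)) (order : List (Int × Int)) (p : Int × Int) : Bool :=
  match pvPropose g order p.1 p.2 with
  | none => false
  | some tgt =>
    !(PySem.Set.contains g (pvMirror p tgt) &&
        (pvPropose g order (pvMirror p tgt).1 (pvMirror p tgt).2 == some tgt))

def pvBSide (g : List (Int × Int)) (order : List (Int × Int)) : Int :=
  (g.countP (pvBGood g order) : Int)

def pvMatches (g : List (Int × Int)) (q : PvFn × (Int × Int)) : Prop :=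
  ∀ x y : Int, q.1 g x y = if pvBlocked g q.2 x y then none else some (x + q.2.1, y + q.2.2)

def pvRowFree (g : List (Int × Int)) (t : Int × Int) : Prop :=
  (t.1 - 1, t.2) ∉ g ∧ (t.1, t.2) ∉ g ∧ (t.1 + 1, t.2) ∉ g

def pvColFree (g : List (Int × Int)) (t : Int × Int) : Prop :=
  (t.1, t.2 - 1) ∉ g ∧ (t.1, t.2) ∉ g ∧ (t.1, t.2 + 1) ∉ g

lemma pv_mod4 (tn : Int) :
    PySem.Int.mod tn 4 = 0 ∨ PySem.Int.mod tn 4 = 1 ∨ PySem.Int.mod tn 4 = 2 ∨ PySem.Int.mod tn 4 = 3 := by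
  have h1 : 0 ≤ PySem.Int.mod tn 4 := PySem.Int.mod_nonneg (a := tn) (b := 4) (by norm_num)
  have h2 : PySem.Int.mod tn 4 < 4 := PySem.Int.mod_lt (a := tn) (b := 4) (by norm_num)
  omega

lemma pv_inter_ofList_nil_iff (l g : List (Int × Int)) :
    PySem.Set.inter (PySem.Set.ofList l) g = [] ↔ ∀ c ∈ l, c ∉ g := by
  rw [List.eq_nil_iff_forall_not_mem]
  simp only [PySem.Set.mem_inter, PySem.Set.mem_ofList, not_and]

lemma pv_iso_iff (g : List (Int × Int)) (p : Int × Int) :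
    (PySem.Set.inter (PySem.Set.ofList (pvNbrCells p)) g = []) ↔ pvIsolated g p.1 p.2 = true := by
  rw [pv_inter_ofList_nil_iff]
  have e1 : ∀ a : Int, a + (-1 : Int) = a - 1 := fun a => by ring
  simp [pvNbrCells, pvNbrDeltas, pvIsolated, e1]
  tauto

lemma pv_match_north (g : List (Int × Int)) : pvMatches g (propose_north, ((0 : Int), (-1 : Int))) := by
  intro x y
  show propose_north g x y
      = if pvBlocked g ((0 : Int), (-1 : Int)) x y then none else some (x + (0 : Int), y + (-1 : Int))
  unfold propose_north pvBlocked
  have e1 : ∀ a : Int, a + (-1 : Int) = a - 1 := fun a => by ring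
  by_cases h1 : ((x - 1, y - 1) : Int × Int) ∈ g <;> by_cases h2 : ((x, y - 1) : Int × Int) ∈ g <;>
    by_cases h3 : ((x + 1, y - 1) : Int × Int) ∈ g <;>
    simp [pv_inter_ofList_nil_iff, e1, h1, h2, h3]

lemma pv_match_south (g : List (Int × Int)) : pvMatches g (propose_south, ((0 : Int), (1 : Int))) := by
  intro x y
  show propose_south g x y
      = if pvBlocked g ((0 : Int), (1 : Int)) x y then none else some (x + (0 : Int), y + (1 : Int))
  unfold propose_south pvBlocked
  by_cases h1 : ((x - 1, y + 1) : Int × Int) ∈ g <;> by_cases h2 : ((x, y + 1) : Int × Int) ∈ g <;>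
    by_cases h3 : ((x + 1, y + 1) : Int × Int) ∈ g <;>
    simp [pv_inter_ofList_nil_iff, h1, h2, h3]

lemma pv_match_west (g : List (Int × Int)) : pvMatches g (propose_west, ((-1 : Int), (0 : Int))) := by
  intro x y
  show propose_west g x y
      = if pvBlocked g ((-1 : Int), (0 : Int)) x y then none else some (x + (-1 : Int), y + (0 : Int))
  unfold propose_west pvBlocked
  have e1 : ∀ a : Int, a + (-1 : Int) = a - 1 := fun a => by ring
  have hb0 : (((-1 : Int)) == 0) = false := by decide
  by_cases h1 : ((x - 1, y - 1) : Int × Int) ∈ g <;> by_cases h2 : ((x - 1, y) : Int × Int) ∈ g <;>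
    by_cases h3 : ((x - 1, y + 1) : Int × Int) ∈ g <;>
    simp [pv_inter_ofList_nil_iff, e1, hb0, h1, h2, h3]

lemma pv_match_east (g : List (Int × Int)) : pvMatches g (propose_east, ((1 : Int), (0 : Int))) := by
  intro x y
  show propose_east g x y
      = if pvBlocked g ((1 : Int), (0 : Int)) x y then none else some (x + (1 : Int), y + (0 : Int))
  unfold propose_east pvBlocked
  have hb0 : (((1 : Int)) == 0) = false := by decide
  by_cases h1 : ((x + 1, y - 1) : Int × Int) ∈ g <;> by_cases h2 : ((x + 1, y) : Int × Int) ∈ g <;>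
    by_cases h3 : ((x + 1, y + 1) : Int × Int) ∈ g <;>
    simp [pv_inter_ofList_nil_iff, hb0, h1, h2, h3]

lemma pv_corr (g : List (Int × Int)) (x y : Int) :
    ∀ pl : List (PvFn × (Int × Int)), (∀ q ∈ pl, pvMatches g q) →
      (pl.map Prod.fst).findSome? (fun f => f g x y) = pvFirstDir g (pl.map Prod.snd) x y := by
  intro pl
  induction pl with
  | nil => intro _; rfl
  | cons q rest ih =>
    intro h
    have hq := h q (by simp)
    have hr := ih (fun r hrm => h r (by simp [hrm]))
    simp only [List.map_cons, List.findSome?_cons]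
    rw [hq x y]
    by_cases hb : pvBlocked g q.2 x y
    · simp [pvFirstDir, hb, hr]
    · simp [pvFirstDir, hb]

lemma pv_a_fold_char (g : List (Int × Int)) (fns : List PvFn) (F : (Int × Int) → Option (Int × Int))
    (hFa : ∀ p, F p = if PySem.Set.inter (PySem.Set.ofList (pvNbrCells p)) g = [] then none
        else fns.findSome? (fun f => f g p.1 p.2)) :
    ∀ (l : List (Int × Int)) (d : PySem.Dict (Int × Int) (List (Int × Int))),
      (l.foldl (fun d p =>
        if PySem.Set.inter (PySem.Set.ofList (pvNbrCells p)) g = [] then d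
        else
          match fns.findSome? (fun f => f g p.1 p.2) with
          | some proposed => d.modify proposed [] (· ++ [p])
          | none => d) d)
      = ((l.filterMap fun p => (F p).map fun t => (t, p)).foldl
          (fun d r => d.modify r.1 [] (· ++ [r.2])) d) := by
  intro l
  induction l with
  | nil => intro d; rfl
  | cons p rest ih =>
    intro d
    simp only [List.foldl_cons, List.filterMap_cons]
    by_cases hiso : PySem.Set.inter (PySem.Set.ofList (pvNbrCells p)) g = []
    · have hFn : F p = none := by rw [hFa p, if_pos hiso]
      simp [hiso, hFn, ih]
    · have hFp : F p = fns.findSome? fun f => f g p.1 p.2 := by rw [hFa p, if_neg hiso]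
      cases hfs : fns.findSome? fun f => f g p.1 p.2 with
      | none => simp [hiso, hFp, hfs, ih]
      | some t => simp [hiso, hFp, hfs, ih]

lemma pv_filtermap_swap (g : List (Int × Int)) (F : (Int × Int) → Option (Int × Int)) :
    (g.filterMap fun p => (F p).map fun t => ((t, p) : (Int × Int) × (Int × Int)))
      = (g.filterMap fun p => (F p).map fun t => (p, t)).map Prod.swap := by
  induction g with
  | nil => rfl
  | cons a l ih => cases hF : F a <;> simp [hF, ih, Prod.swap]

lemma pv_countP_fst_eq_count (rs : List ((Int × Int) × (Int × Int))) (c : Int × Int) :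
    rs.countP (fun r => r.1 == c) = (rs.map fun r => r.1).count c := by
  induction rs with
  | nil => rfl
  | cons a l ih => simp [List.countP_cons, List.count_cons, ih]

lemma pv_count_one_key (ts : List (Int × Int)) :
    (PySem.Set.ofList ts).countP (fun k => ts.count k == 1) = ts.countP (fun t => ts.count t == 1) := by
  have h1 : ((PySem.Set.ofList ts).filter fun k => ts.count k == 1).Nodup :=
    (PySem.Set.nodup_ofList ts).filter _
  have h2 : (ts.filter fun t => ts.count t == 1).Nodup := by
    rw [List.nodup_iff_count_le_one]
    intro a
    by_cases ha : a ∈ ts.filter fun t => ts.count t == 1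
    · have hc : ts.count a = 1 := by
        have := (List.mem_filter.1 ha).2
        simpa using this
      have hsub : List.Sublist (ts.filter fun t => ts.count t == 1) ts := List.filter_sublist
      have hle : (ts.filter fun t => ts.count t == 1).count a ≤ ts.count a := hsub.count_le a
      omega
    · simp [List.count_eq_zero_of_not_mem ha]
  have hperm : List.Perm ((PySem.Set.ofList ts).filter fun k => ts.count k == 1)
      (ts.filter fun t => ts.count t == 1) := by
    rw [List.perm_ext_iff_of_nodup h1 h2]
    intro a
    simp [List.mem_filter, PySem.Set.mem_ofList]
  rw [List.countP_eq_length_filter, List.countP_eq_length_filter]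
  exact hperm.length_eq

lemma pv_aside_count (g : List (Int × Int)) (fns : List PvFn) (F : (Int × Int) → Option (Int × Int))
    (hFa : ∀ p, F p = if PySem.Set.inter (PySem.Set.ofList (pvNbrCells p)) g = [] then none
        else fns.findSome? (fun f => f g p.1 p.2)) :
    pvASide g fns
      = (((g.filterMap fun p => (F p).map fun t => (p, t)).map fun q => q.2).countP
          (fun t => ((g.filterMap fun p => (F p).map fun t => (p, t)).map fun q => q.2).count t == 1) : Int) := by
  have hchar : pvAFold g fns = ((g.filterMap fun p => (F p).map fun t => (t, p)).foldl
      (fun d r => d.modify r.1 [] (· ++ [r.2])) PySem.Dict.empty) :=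
    pv_a_fold_char g fns F hFa g PySem.Dict.empty
  unfold pvASide
  rw [hchar]
  set ps := g.filterMap fun p => (F p).map fun t => ((p, t) : (Int × Int) × (Int × Int)) with hps
  set rs := g.filterMap fun p => (F p).map fun t => ((t, p) : (Int × Int) × (Int × Int)) with hrs
  have hswap : rs = ps.map Prod.swap := pv_filtermap_swap g F
  set D := rs.foldl (fun d r => d.modify r.1 [] (· ++ [r.2])) PySem.Dict.empty with hD
  have hnd : D.keys.Nodup := by
    rw [hD]
    apply PySem.Dict.nodup_keys_foldl_modify_key
    simp [PySem.Dict.keys_empty]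
  have hkeys : D.keys = PySem.Set.ofList (rs.map fun r => r.1) := by
    rw [hD, PySem.Dict.keys_foldl_modify_key]
    simp [PySem.Dict.keys_empty, PySem.Set.update_nil_left]
  have hget : ∀ c, D.getD c [] = ((rs.filter fun r => r.1 == c).map fun r => r.2) := by
    intro c
    rw [hD, PySem.Dict.getD_foldl_modify_append]
    simp [PySem.Dict.getD_empty]
  rw [PySem.Dict.items_eq_map_keys D hnd ([] : List (Int × Int))]
  rw [PySem.List.foldl_if_add_one]
  rw [List.countP_map]
  rw [hkeys]
  have hpred : ∀ k ∈ PySem.Set.ofList (rs.map fun r => r.1),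
      ((((fun kv : (Int × Int) × List (Int × Int) => kv.2.length == 1) ∘ fun k => (k, D.getD k [])) k)
          = true
        ↔ (((rs.map fun r => r.1).count k == 1) = true)) := by
    intro k _
    show (((D.getD k []).length == 1) = true) ↔ (((rs.map fun r => r.1).count k == 1) = true)
    rw [hget k, List.length_map, ← List.countP_eq_length_filter, pv_countP_fst_eq_count]
  rw [List.countP_congr hpred]
  rw [pv_count_one_key (rs.map fun r => r.1)]
  rw [hswap]
  simp only [List.map_map, zero_add]
  rfl

lemma pv_if_not (c : Bool) (m : Int) : (if c then m else m + 1) = (if !c then m + 1 else m) := by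
  cases c <;> simp

-- B's fold is a countP of pvBGood
lemma pv_bside_fold (g l : List (Int × Int)) (order : List (Int × Int)) (n : Int) :
    (l.foldl (fun num_changes p =>
      match pvPropose g order p.1 p.2 with
      | none => num_changes
      | some tgt =>
        if PySem.Set.contains g (2 * tgt.1 - p.1, 2 * tgt.2 - p.2) &&
            (pvPropose g order (2 * tgt.1 - p.1) (2 * tgt.2 - p.2) == some tgt) then
          num_changes
        else num_changes + 1) n)
      = n + (l.countP (pvBGood g order) : Int) := by
  have hbody : (fun (num_changes : Int) (p : Int × Int) =>
      match pvPropose g order p.1 p.2 with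
      | none => num_changes
      | some tgt =>
        if PySem.Set.contains g (2 * tgt.1 - p.1, 2 * tgt.2 - p.2) &&
            (pvPropose g order (2 * tgt.1 - p.1) (2 * tgt.2 - p.2) == some tgt) then
          num_changes
        else num_changes + 1)
      = (fun num_changes p => if pvBGood g order p then num_changes + 1 else num_changes) := by
    funext m p
    unfold pvBGood pvMirror
    cases hF : pvPropose g order p.1 p.2 with
    | none => simp
    | some tgt => exact pv_if_not _ m
  rw [hbody, PySem.List.foldl_if_add_one]

-- count of a target among proposals = number of proposers in g
lemma pv_count_targets (g : List (Int × Int)) (F : (Int × Int) → Option (Int × Int)) (t : Int × Int) :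
    ((g.filterMap fun p => (F p).map fun t => ((p, t) : (Int × Int) × (Int × Int))).map
        fun q => q.2).count t
      = g.countP (fun q => F q == some t) := by
  induction g with
  | nil => rfl
  | cons a l ih =>
    cases hF : F a with
    | none => simp [hF, ih]
    | some u =>
      by_cases hu : u = t
      · simp [hF, hu, ih]
      · simp [hF, hu, ih]

lemma pv_countP_filterMap (g : List (Int × Int)) (F : (Int × Int) → Option (Int × Int))
    (pred : (Int × Int) → (Int × Int) → Bool) :
    (g.filterMap fun p => (F p).map fun t => ((p, t) : (Int × Int) × (Int × Int))).countP
        (fun m => pred m.1 m.2)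
      = g.countP (fun p => match F p with | none => false | some t => pred p t) := by
  induction g with
  | nil => rfl
  | cons a l ih => cases hF : F a <;> simp [hF, List.countP_cons, ih]

-- shape of any proposal: the target is one step N/S/W/E, and the three cells the proposer checked
-- (the row through t for a vertical move, the column through t for a horizontal move) are empty
lemma pv_firstDir_shape (g : List (Int × Int)) (x y : Int) (t : Int × Int) :
    ∀ order : List (Int × Int), (∀ d ∈ order, d ∈ pvAllDirs) →
      pvFirstDir g order x y = some t →
      ((t = (x, y - 1) ∨ t = (x, y + 1)) ∧ pvRowFree g t) ∨
        ((t = (x - 1, y) ∨ t = (x + 1, y)) ∧ pvColFree g t) := by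
  have e1 : ∀ a : Int, a + (-1 : Int) = a - 1 := fun a => by ring
  intro order
  induction order with
  | nil => intro _ h; simp [pvFirstDir] at h
  | cons d rest ih =>
    intro hdirs h
    by_cases hb : pvBlocked g d x y
    · exact ih (fun e he => hdirs e (by simp [he])) (by simpa [pvFirstDir, hb] using h)
    · have ht : t = (x + d.1, y + d.2) := by
        have h' := h
        simp only [pvFirstDir, if_neg hb] at h'
        exact (Option.some.injEq _ _ ▸ h').symm
      have hd : d = ((0 : Int), (-1 : Int)) ∨ d = ((0 : Int), (1 : Int)) ∨
          d = ((-1 : Int), (0 : Int)) ∨ d = ((1 : Int), (0 : Int)) := by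
        have := hdirs d (by simp)
        simpa [pvAllDirs] using this
      rcases hd with hd | hd | hd | hd <;> subst hd <;> subst ht <;>
        simp only [pvBlocked] at hb <;> norm_num at hb <;>
        (try simp only [e1] at hb) <;>
        norm_num [pvRowFree, pvColFree, e1] <;>
        exact ⟨hb.1.1, hb.1.2, hb.2⟩

lemma pv_propose_shape (g : List (Int × Int)) (order : List (Int × Int))
    (hdirs : ∀ d ∈ order, d ∈ pvAllDirs) (x y : Int) (t : Int × Int)
    (h : pvPropose g order x y = some t) :
    ((t = (x, y - 1) ∨ t = (x, y + 1)) ∧ pvRowFree g t) ∨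
      ((t = (x - 1, y) ∨ t = (x + 1, y)) ∧ pvColFree g t) := by
  unfold pvPropose at h
  by_cases hiso : pvIsolated g x y
  · simp [hiso] at h
  · exact pv_firstDir_shape g x y t order hdirs (by simpa [hiso] using h)

-- the mirror elf is never the elf itself
lemma pv_mirror_ne (g : List (Int × Int)) (order : List (Int × Int))
    (hdirs : ∀ d ∈ order, d ∈ pvAllDirs) (p t : Int × Int)
    (h : pvPropose g order p.1 p.2 = some t) : pvMirror p t ≠ p := by
  obtain ⟨px, py⟩ := p
  obtain ⟨tx, ty⟩ := t
  have hs := pv_propose_shape g order hdirs px py (tx, ty) h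
  simp only [pvMirror, Prod.mk.injEq, ne_eq, not_and]
  rcases hs with ⟨h1 | h1, _⟩ | ⟨h1 | h1, _⟩ <;>
    (try simp only [Prod.mk.injEq] at h1) <;> omega

-- two elves of the grid proposing the same target are each other's mirror (head-on collision):
-- a perpendicular competitor would sit on a cell the first proposer verified to be empty
lemma pv_competitor (g : List (Int × Int)) (order : List (Int × Int))
    (hdirs : ∀ d ∈ order, d ∈ pvAllDirs) (p q t : Int × Int) (hq : q ∈ g)
    (hp' : pvPropose g order p.1 p.2 = some t)
    (hq' : pvPropose g order q.1 q.2 = some t) :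
    q = p ∨ q = pvMirror p t := by
  obtain ⟨px, py⟩ := p
  obtain ⟨qx, qy⟩ := q
  obtain ⟨tx, ty⟩ := t
  have hsp := pv_propose_shape g order hdirs px py (tx, ty) hp'
  have hsq := pv_propose_shape g order hdirs qx qy (tx, ty) hq'
  simp only [pvMirror, Prod.mk.injEq, pvRowFree, pvColFree] at hsp hsq ⊢
  rcases hsp with ⟨hp1 | hp1, hpf⟩ | ⟨hp1 | hp1, hpf⟩ <;>
    rcases hsq with ⟨hq1 | hq1, _⟩ | ⟨hq1 | hq1, _⟩ <;>
      obtain ⟨hf1, hf2, hf3⟩ := hpf <;>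
      first
        | omega
        | (exfalso
           have e : ((qx, qy) : Int × Int) = (tx - 1, ty) := by
             simp only [Prod.mk.injEq]; omega
           exact hf1 (e ▸ hq))
        | (exfalso
           have e : ((qx, qy) : Int × Int) = (tx + 1, ty) := by
             simp only [Prod.mk.injEq]; omega
           exact hf3 (e ▸ hq))
        | (exfalso
           have e : ((qx, qy) : Int × Int) = (tx, ty - 1) := by
             simp only [Prod.mk.injEq]; omega
           exact hf1 (e ▸ hq))
        | (exfalso
           have e : ((qx, qy) : Int × Int) = (tx, ty + 1) := by
             simp only [Prod.mk.injEq]; omega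
           exact hf3 (e ▸ hq))

-- in a duplicate-free list whose satisfiers all lie in {p, m}, the count is 1 iff m is no satisfier
lemma pv_count_one_iff (g : List (Int × Int)) (P : (Int × Int) → Bool) (hnd : g.Nodup)
    (p m : Int × Int) (hp : p ∈ g) (hPp : P p = true) (hne : m ≠ p)
    (honly : ∀ q ∈ g, P q = true → q = p ∨ q = m) :
    (g.countP P = 1 ↔ ¬(m ∈ g ∧ P m = true)) := by
  rw [List.countP_eq_length_filter]
  have hpl : p ∈ g.filter P := List.mem_filter.2 ⟨hp, hPp⟩
  constructor
  · rintro h1 ⟨hm, hPm⟩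
    have hml : m ∈ g.filter P := List.mem_filter.2 ⟨hm, hPm⟩
    obtain ⟨a, ha⟩ := List.length_eq_one_iff.1 h1
    rw [ha] at hpl hml
    simp only [List.mem_singleton] at hpl hml
    exact hne (hml.trans hpl.symm)
  · intro hno
    have hall : ∀ q ∈ g.filter P, q = p := by
      intro q hql
      have hqg := List.mem_filter.1 hql
      rcases honly q hqg.1 hqg.2 with h | h
      · exact h
      · exact absurd ⟨h ▸ hqg.1, h ▸ hqg.2⟩ hno
    have hrep : g.filter P = List.replicate (g.filter P).length p :=
      List.eq_replicate_of_mem hall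
    have hle : (g.filter P).length ≤ 1 := by
      have := hnd.filter P
      rw [hrep] at this
      exact List.nodup_replicate.1 this
    have hpos : 0 < (g.filter P).length := List.length_pos_of_mem hpl
    omega

-- membership in the proposal list
lemma pv_mem_ps (g : List (Int × Int)) (F : (Int × Int) → Option (Int × Int)) (p t : Int × Int) :
    (p, t) ∈ (g.filterMap fun p => (F p).map fun t => ((p, t) : (Int × Int) × (Int × Int))) ↔
      p ∈ g ∧ F p = some t := by
  simp only [List.mem_filterMap, Option.map_eq_some_iff]
  constructor
  · rintro ⟨a, ha, t', hFt', he⟩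
    obtain ⟨rfl, rfl⟩ := Prod.mk.injEq .. ▸ he
    exact ⟨ha, hFt'⟩
  · rintro ⟨hp, hF⟩
    exact ⟨p, hp, t, hF, rfl⟩

-- the generic equivalence for one rotation of the direction order
lemma pv_generic (g : List (Int × Int)) (hnd : g.Nodup) (pl : List (PvFn × (Int × Int)))
    (hm : ∀ q ∈ pl, pvMatches g q) (hdirs : ∀ d ∈ pl.map Prod.snd, d ∈ pvAllDirs) :
    pvASide g (pl.map Prod.fst) = pvBSide g (pl.map Prod.snd) := by
  set order := pl.map Prod.snd with horder
  set F : (Int × Int) → Option (Int × Int) := fun p => pvPropose g order p.1 p.2 with hF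
  have hFa : ∀ p, F p = if PySem.Set.inter (PySem.Set.ofList (pvNbrCells p)) g = [] then none
      else (pl.map Prod.fst).findSome? (fun f => f g p.1 p.2) := by
    intro p
    rw [hF]
    show pvPropose g order p.1 p.2 = _
    unfold pvPropose
    by_cases hiso : pvIsolated g p.1 p.2
    · rw [if_pos hiso, if_pos ((pv_iso_iff g p).2 hiso)]
    · rw [if_neg hiso, if_neg (fun hnil => hiso ((pv_iso_iff g p).1 hnil)),
        pv_corr g p.1 p.2 pl hm]
  rw [pv_aside_count g (pl.map Prod.fst) F hFa]
  set ps := g.filterMap fun p => (F p).map fun t => ((p, t) : (Int × Int) × (Int × Int)) with hps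
  have hmatch : g.countP (pvBGood g order) = ps.countP
      (fun m => !(PySem.Set.contains g (pvMirror m.1 m.2) && (F (pvMirror m.1 m.2) == some m.2))) :=
    (pv_countP_filterMap g F
      (fun p t => !(PySem.Set.contains g (pvMirror p t) && (F (pvMirror p t) == some t)))).symm
  have hcong : ((ps.map fun q => q.2).countP
        (fun t => (ps.map fun q => q.2).count t == 1))
      = ps.countP
        (fun m => !(PySem.Set.contains g (pvMirror m.1 m.2) && (F (pvMirror m.1 m.2) == some m.2))) := by
    rw [List.countP_map]
    apply List.countP_congr
    rintro ⟨p, t⟩ hmem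
    obtain ⟨hpg, hFp⟩ := (pv_mem_ps g F p t).1 (hps ▸ hmem)
    have hcnt := pv_count_targets g F t
    have hiff := pv_count_one_iff g (fun q => F q == some t) hnd p (pvMirror p t) hpg
      (by simp [hFp]) (pv_mirror_ne g order hdirs p t hFp)
      (fun q hq hP => pv_competitor g order hdirs p q t hq hFp (by simpa using hP))
    show (((ps.map fun q => q.2).count t == 1) = true)
        ↔ ((!(PySem.Set.contains g (pvMirror p t) && (F (pvMirror p t) == some t))) = true)
    rw [hps, hcnt]
    constructor
    · intro h
      have h1 : g.countP (fun q => F q == some t) = 1 := by simpa using h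
      have hno := hiff.1 h1
      simp only [Bool.not_eq_true', Bool.and_eq_false_iff]
      by_cases hc : PySem.Set.contains g (pvMirror p t) = true
      · right
        rcases Decidable.em ((F (pvMirror p t) == some t) = true) with he | he
        · exact absurd ⟨(PySem.Set.contains_iff _ _).1 hc, he⟩ hno
        · simpa using he
      · left
        simpa using hc
    · intro h
      have hno : ¬(pvMirror p t ∈ g ∧ ((fun q => F q == some t) (pvMirror p t)) = true) := by
        rintro ⟨hmg, hFe⟩
        have hc : PySem.Set.contains g (pvMirror p t) = true := (PySem.Set.contains_iff _ _).2 hmg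
        simp only [hc, Bool.true_and] at h
        exact absurd hFe (by simpa using h)
      have h1 := hiff.2 hno
      simp [h1]
  unfold pvBSide
  rw [hcong, hmatch]

lemma pv_port_eq (g : List (Int × Int)) (tn : Int) (hnd : g.Nodup) :
    do_turn g tn = do_turn_alt g tn := by
  have hA : do_turn g tn = pvASide g
      (PySem.List.slice [propose_north, propose_south, propose_west, propose_east]
          (some (PySem.Int.mod tn 4)) none ++
        PySem.List.slice [propose_north, propose_south, propose_west, propose_east]
          none (some (PySem.Int.mod tn 4))) := rfl
  have hB : do_turn_alt g tn = pvBSide g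
      (PySem.List.slice pvAllDirs (some (PySem.Int.mod tn 4)) none ++
        PySem.List.slice pvAllDirs none (some (PySem.Int.mod tn 4))) := by
    show (g.foldl _ (0 : Int)) = _
    rw [pv_bside_fold]
    unfold pvBSide
    omega
  rw [hA, hB]
  rcases pv_mod4 tn with h | h | h | h <;> rw [h]
  · exact pv_generic g hnd
      [(propose_north, (0, -1)), (propose_south, (0, 1)), (propose_west, (-1, 0)), (propose_east, (1, 0))]
      (by
        intro q hq
        fin_cases hq
        · exact pv_match_north g
        · exact pv_match_south g
        · exact pv_match_west g
        · exact pv_match_east g)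
      (by decide)
  · exact pv_generic g hnd
      [(propose_south, (0, 1)), (propose_west, (-1, 0)), (propose_east, (1, 0)), (propose_north, (0, -1))]
      (by
        intro q hq
        fin_cases hq
        · exact pv_match_south g
        · exact pv_match_west g
        · exact pv_match_east g
        · exact pv_match_north g)
      (by decide)
  · exact pv_generic g hnd
      [(propose_west, (-1, 0)), (propose_east, (1, 0)), (propose_north, (0, -1)), (propose_south, (0, 1))]
      (by
        intro q hq
        fin_cases hq
        · exact pv_match_west g
        · exact pv_match_east g
        · exact pv_match_north g
        · exact pv_match_south g)
      (by decide)
  · exact pv_generic g hnd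
      [(propose_east, (1, 0)), (propose_north, (0, -1)), (propose_south, (0, 1)), (propose_west, (-1, 0))]
      (by
        intro q hq
        fin_cases hq
        · exact pv_match_east g
        · exact pv_match_north g
        · exact pv_match_south g
        · exact pv_match_west g)
      (by decide)

-- ===== VERDICT (by name: the statement is the Claim_ definition above) =====
theorem do_turn_spec : Claim_equal_do_turn := by
  intro grid turn_number _ hpre
  unfold Spec_do_turn
  exact pv_port_eq grid turn_number hpre
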